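-- pv_equiv track=rewrite | github.com/dshadowexp/herkat | services/services/kobina.py | findOccurencesAndSwap
-- ===== SOURCE A (Python) =====
-- def findOccurencesAndSwap(c1, c2, word):
--     result = []
--     for letter in word:
--         if letter == c1:
--             result.append(c2)
--         elif letter == c2:
--             result.append(c1)
--         else:
--             result.append(letter)
--     return ''.join(result)
-- ===== SOURCE B (Python) =====
-- def findOccurencesAndSwap(c1, c2, word):
--     # staged: find the occurrence positions first, then patch them in place
--     chars = list(word)
--     idx1 = [i for i, ch in enumerate(chars) if ch == c1]
--     idx2 = [i for i, ch in enumerate(chars) if ch == c2]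
--     for i in idx1:
--         chars[i] = c2
--     for i in idx2:
--         chars[i] = c1
--     return ''.join(chars)
-- ===== Notes on version B (the rewrite author's own statement) =====
-- stated objective: alternative
-- what changed: Instead of one pass with per-character if/elif branching, B first collects the occurrence index lists of c1 and c2 ('find occurrences'), then patches a mutable character list at those positions in two assignment passes and joins it.
import Mathlib
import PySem

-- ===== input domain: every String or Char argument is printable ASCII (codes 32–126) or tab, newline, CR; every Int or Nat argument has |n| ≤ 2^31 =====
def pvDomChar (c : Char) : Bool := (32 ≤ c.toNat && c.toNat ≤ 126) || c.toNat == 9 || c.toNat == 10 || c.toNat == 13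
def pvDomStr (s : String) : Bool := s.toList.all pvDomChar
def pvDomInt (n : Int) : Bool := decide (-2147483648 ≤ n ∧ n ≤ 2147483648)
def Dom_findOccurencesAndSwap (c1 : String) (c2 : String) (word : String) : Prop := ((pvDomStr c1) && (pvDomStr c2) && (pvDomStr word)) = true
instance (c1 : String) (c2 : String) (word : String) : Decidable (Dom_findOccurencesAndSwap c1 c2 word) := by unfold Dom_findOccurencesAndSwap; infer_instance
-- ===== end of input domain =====

-- B replaces A's single branching pass by a staged strategy: first collect the
-- occurrence index lists of c1 and c2, then patch a mutable character list at
-- those positions in two assignment passes (alternative decomposition, same cost).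

-- ===== PORT A =====
-- for letter in word: append c2 / c1 / letter depending on the if/elif; then ''.join(result)
def findOccurencesAndSwap (c1 : String) (c2 : String) (word : String) : String :=
  let result := word.toList.foldl (fun acc letter =>
    if String.ofList [letter] == c1 then acc ++ [c2]
    else if String.ofList [letter] == c2 then acc ++ [c1]
    else acc ++ [String.ofList [letter]]) []
  PySem.Str.join "" result

-- ===== PORT B =====
-- chars = list(word); idx1/idx2 = occurrence indices of c1/c2; two in-place
-- assignment passes; ''.join(chars).  Indices from enumerate are the list
-- positions (always in range and nonnegative), so Nat indexing with List.set
-- is exact here.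
def findOccurencesAndSwap_alt (c1 : String) (c2 : String) (word : String) : String :=
  let chars := word.toList.map (fun ch => String.ofList [ch])
  let idx1 := chars.zipIdx.filterMap (fun p => if p.1 == c1 then some p.2 else none)
  let idx2 := chars.zipIdx.filterMap (fun p => if p.1 == c2 then some p.2 else none)
  let chars1 := idx1.foldl (fun acc i => acc.set i c2) chars
  let chars2 := idx2.foldl (fun acc i => acc.set i c1) chars1
  PySem.Str.join "" chars2

-- ===== PRECONDITION & SPEC =====
def Spec_findOccurencesAndSwap (c1 : String) (c2 : String) (word : String) (out : String) : Prop := out = findOccurencesAndSwap_alt c1 c2 word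
instance (c1 : String) (c2 : String) (word : String) (out : String) : Decidable (Spec_findOccurencesAndSwap c1 c2 word out) := by unfold Spec_findOccurencesAndSwap; infer_instance

-- ===== CLAIM =====
def Claim_equal_findOccurencesAndSwap : Prop := ∀ (c1 : String) (c2 : String) (word : String), Dom_findOccurencesAndSwap c1 c2 word → Spec_findOccurencesAndSwap c1 c2 word (findOccurencesAndSwap c1 c2 word)

-- ===== LEMMAS AND PROOFS =====

-- An assignment pass over the occurrence indices of p in l (computed on l,
-- applied to a same-length list m behind a fixed prefix) is a zipWith.
theorem pv_patch_pass (v : String) (p : String → Bool) :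
    ∀ (l m pre : List String), m.length = l.length →
    ((l.zipIdx pre.length).filterMap (fun q => if p q.1 then some q.2 else none)).foldl
        (fun acc i => acc.set i v) (pre ++ m)
      = pre ++ List.zipWith (fun x y => if p x then v else y) l m := by
  intro l
  induction l with
  | nil => intro m pre h; simp at h; simp [h, List.zipIdx]
  | cons x xs ih =>
    intro m pre h
    cases m with
    | nil => simp at h
    | cons y ys =>
      simp at h
      by_cases hx : p x
      · have hset : (pre ++ y :: ys).set pre.length v = pre ++ v :: ys := by
          simp [List.set_append_right]
        have := ih ys (pre ++ [v]) (by simpa using h)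
        simp only [List.append_assoc, List.singleton_append] at this
        simpa [List.zipIdx_cons, hx, List.filterMap_cons, hset, Nat.add_comm] using this
      · have := ih ys (pre ++ [y]) (by simpa using h)
        simp only [List.append_assoc, List.singleton_append] at this
        simpa [List.zipIdx_cons, hx, List.filterMap_cons, Nat.add_comm] using this

-- the two staged passes collapse to A's per-character if/elif map
theorem pv_two_pass (c1 c2 : String) :
    ∀ (l : List String),
    List.zipWith (fun x y => if x == c2 then c1 else y) l
        (List.zipWith (fun x y => if x == c1 then c2 else y) l l)
      = l.map (fun x => if x == c1 then c2 else if x == c2 then c1 else x) := by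
  intro l
  induction l with
  | nil => rfl
  | cons x xs ih =>
    simp only [List.zipWith_cons_cons, List.map_cons, ih]
    congr 1
    by_cases h1 : x = c1 <;> by_cases h2 : x = c2 <;> simp [h1, h2] <;> simp_all

theorem findOccurencesAndSwap_spec : Claim_equal_findOccurencesAndSwap := by
  intro c1 c2 word _
  show findOccurencesAndSwap c1 c2 word = findOccurencesAndSwap_alt c1 c2 word
  unfold findOccurencesAndSwap findOccurencesAndSwap_alt
  simp only []
  congr 1
  set l := word.toList.map (fun ch => String.ofList [ch]) with hl
  have h1 := pv_patch_pass c2 (fun x => x == c1) l l [] rfl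
  simp only [List.nil_append, List.length_nil] at h1
  have hlen : (List.zipWith (fun x y => if (x == c1) = true then c2 else y) l l).length = l.length := by
    simp
  have h2 := pv_patch_pass c1 (fun x => x == c2) l
      (List.zipWith (fun x y => if (x == c1) = true then c2 else y) l l) [] hlen
  simp only [List.nil_append, List.length_nil] at h2
  have hf : ∀ (acc : List String) (letter : Char),
      (if String.ofList [letter] == c1 then acc ++ [c2]
       else if String.ofList [letter] == c2 then acc ++ [c1]
       else acc ++ [String.ofList [letter]])
        = acc ++ [if String.ofList [letter] == c1 then c2
                  else if String.ofList [letter] == c2 then c1 else String.ofList [letter]] := by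
    intro acc letter; split_ifs <;> rfl
  calc List.foldl (fun acc letter =>
        if String.ofList [letter] == c1 then acc ++ [c2]
        else if String.ofList [letter] == c2 then acc ++ [c1]
        else acc ++ [String.ofList [letter]]) [] word.toList
      = List.foldl (fun acc letter => acc ++ [if String.ofList [letter] == c1 then c2
          else if String.ofList [letter] == c2 then c1 else String.ofList [letter]]) [] word.toList := by
        simp only [hf]
    _ = l.map (fun x => if x == c1 then c2 else if x == c2 then c1 else x) := by
        rw [PySem.List.foldl_append_singleton_eq_map]
        simp [hl, List.map_map, Function.comp]
    _ = _ := by rw [h1, h2, pv_two_pass]
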